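-- pv_equiv track=rewrite | github.com/ccld/Rubiks_cube-illustrator | parse-string.py | parse_move_notation
-- ===== SOURCE A (Python) =====
-- def parse_move_notation(notation_string):
--     """
--     Parse a move notation string into a list of (face, direction) tuples for perform_moves.
--
--     :param notation_string: String like 'FLRU2Lr' where:
--                             - Uppercase letters are clockwise rotations
--                             - Lowercase letters are counterclockwise rotations
--                             - Numbers after a letter repeat that move that many times
--     :return: List of (face, direction) tuples
--     """
--     moves = []
--     i = 0
--
--     while i < len(notation_string):
--         # Get the current character (face)
--         char = notation_string[i]
--         i += 1
--
--         # Determine the face and direction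
--         if char.isupper():
--             face = char
--             direction = 'cw'  # Uppercase is clockwise
--         else:
--             face = char.upper()
--             direction = 'ccw'  # Lowercase is counterclockwise
--
--         # Check if the next character is a number (repetition)
--         repetitions = 1
--         if i < len(notation_string) and notation_string[i].isdigit():
--             repetitions = int(notation_string[i])
--             i += 1
--
--         # Add the move(s) to the list
--         for _ in range(repetitions):
--             moves.append((face, direction))
--
--     return moves
-- ===== SOURCE B (Python) =====
-- def parse_move_notation(notation_string):
--     # Two-phase: fold the string once into (char, count) tokens with a
--     # one-character pending state, then expand with a flat comprehension.
--     tokens = []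
--     pending = None
--     for c in notation_string:
--         if pending is not None and c.isdigit():
--             tokens.append((pending, int(c)))
--             pending = None
--         else:
--             if pending is not None:
--                 tokens.append((pending, 1))
--             pending = c
--     if pending is not None:
--         tokens.append((pending, 1))
--     return [(c.upper(), 'cw' if c.isupper() else 'ccw')
--             for c, n in tokens for _ in range(n)]
-- ===== Notes on version B (the rewrite author's own statement) =====
-- stated objective: alternative
-- what changed: Replaces A's index-driven while-loop automaton (which appends moves inside the scan) with a two-phase design: a single fold over the characters with a one-char pending state producing (char, count) tokens, then a flattening comprehension that expands each token into its (face, direction) pairs.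
import Mathlib
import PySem

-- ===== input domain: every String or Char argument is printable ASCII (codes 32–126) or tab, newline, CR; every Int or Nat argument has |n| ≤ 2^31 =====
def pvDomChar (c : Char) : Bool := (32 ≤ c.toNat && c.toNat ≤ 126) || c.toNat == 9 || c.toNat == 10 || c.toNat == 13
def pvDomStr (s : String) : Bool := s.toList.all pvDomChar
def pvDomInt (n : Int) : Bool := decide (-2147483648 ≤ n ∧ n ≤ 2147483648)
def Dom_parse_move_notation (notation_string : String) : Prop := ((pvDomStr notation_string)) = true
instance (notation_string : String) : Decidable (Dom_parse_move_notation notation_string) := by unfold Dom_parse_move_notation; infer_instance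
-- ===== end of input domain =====

-- B replaces A's hand-rolled index automaton with a single fold producing (char, count)
-- tokens plus a flattening expansion (objective: alternative/idiomatic, same cost).

-- ===== PORT A =====
-- the (face, direction) pair A computes for one character
def pmnFace (c : Char) : String × String :=
  if PySem.Chars.isupper c then (String.mk [c], "cw")
  else (String.mk [PySem.Chars.upperChar c], "ccw")

-- A's while loop: consumes the face char, then an optional digit char as the
-- repetition count.  int(digit) is ported as d.toNat - 48 (exact on ASCII digits,
-- the only characters PySem.Chars.isdigit accepts).
def pmnLoopA : List Char → List (String × String) → List (String × String)
  | [], moves => moves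
  | c :: rest, moves =>
    let fd := pmnFace c
    match rest with
    | [] => moves ++ List.replicate 1 fd
    | d :: rest' =>
      if PySem.Chars.isdigit d then
        pmnLoopA rest' (moves ++ List.replicate (d.toNat - 48) fd)
      else
        pmnLoopA (d :: rest') (moves ++ List.replicate 1 fd)

def parse_move_notation (notation_string : String) : List (String × String) :=
  pmnLoopA notation_string.toList []

-- ===== PORT B =====
-- B's for-loop body: state = (tokens so far, pending face char or none)
def pmnStep (st : List (Char × Nat) × Option Char) (c : Char) :
    List (Char × Nat) × Option Char :=
  match st.2 with
  | some p =>
    if PySem.Chars.isdigit c then (st.1 ++ [(p, c.toNat - 48)], none)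
    else (st.1 ++ [(p, 1)], some c)
  | none => (st.1, some c)

-- B's trailing 'if pending is not None'
def pmnFinish (st : List (Char × Nat) × Option Char) : List (Char × Nat) :=
  match st.2 with
  | some p => st.1 ++ [(p, 1)]
  | none => st.1

-- B's flattening comprehension (c.upper() of an ASCII uppercase char is itself)
def pmnExpand (tokens : List (Char × Nat)) : List (String × String) :=
  tokens.flatMap (fun t =>
    List.replicate t.2
      (String.mk [PySem.Chars.upperChar t.1],
       if PySem.Chars.isupper t.1 then "cw" else "ccw"))

def parse_move_notation_alt (notation_string : String) : List (String × String) :=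
  pmnExpand (pmnFinish (notation_string.toList.foldl pmnStep ([], none)))

-- ===== PRECONDITION & SPEC =====
def Spec_parse_move_notation (notation_string : String) (out : List (String × String)) : Prop := out = parse_move_notation_alt notation_string
instance (notation_string : String) (out : List (String × String)) : Decidable (Spec_parse_move_notation notation_string out) := by unfold Spec_parse_move_notation; infer_instance

-- ===== CLAIM (what is proved, stated in full; the proofs are below) =====
def Claim_equal_parse_move_notation : Prop := ∀ (notation_string : String), Dom_parse_move_notation notation_string → Spec_parse_move_notation notation_string (parse_move_notation notation_string)

-- ===== LEMMAS AND PROOFS =====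

-- unconditional rewrite equations for the two ports' step functions
lemma pmnStep_none (t : List (Char × Nat)) (c : Char) :
    pmnStep (t, none) c = (t, some c) := rfl

lemma pmnStep_digit (t : List (Char × Nat)) (q c : Char)
    (h : PySem.Chars.isdigit c = true) :
    pmnStep (t, some q) c = (t ++ [(q, c.toNat - 48)], none) := by
  simp [pmnStep, h]

lemma pmnStep_nondigit (t : List (Char × Nat)) (q c : Char)
    (h : PySem.Chars.isdigit c = false) :
    pmnStep (t, some q) c = (t ++ [(q, 1)], some c) := by
  simp [pmnStep, h]

lemma pmnLoopA_one (c : Char) (m : List (String × String)) :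
    pmnLoopA [c] m = m ++ List.replicate 1 (pmnFace c) := rfl

lemma pmnLoopA_digit (c d : Char) (rest : List Char) (m : List (String × String))
    (h : PySem.Chars.isdigit d = true) :
    pmnLoopA (c :: d :: rest) m = pmnLoopA rest (m ++ List.replicate (d.toNat - 48) (pmnFace c)) := by
  rw [pmnLoopA]; simp [h]

lemma pmnLoopA_nondigit (c d : Char) (rest : List Char) (m : List (String × String))
    (h : PySem.Chars.isdigit d = false) :
    pmnLoopA (c :: d :: rest) m = pmnLoopA (d :: rest) (m ++ List.replicate 1 (pmnFace c)) := by
  rw [pmnLoopA]; simp [h]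

-- A's accumulator appends on the left
lemma pmnLoopA_acc_aux : ∀ (n : Nat) (cs : List Char) (m : List (String × String)),
    cs.length ≤ n → pmnLoopA cs m = m ++ pmnLoopA cs [] := by
  intro n
  induction n with
  | zero =>
    intro cs m hlen
    have : cs = [] := List.eq_nil_of_length_eq_zero (Nat.le_zero.mp hlen)
    subst this; simp [pmnLoopA]
  | succ n ih =>
    intro cs m hlen
    match cs with
    | [] => simp [pmnLoopA]
    | [c] => simp [pmnLoopA_one]
    | c :: d :: rest =>
      by_cases h : PySem.Chars.isdigit d = true
      · rw [pmnLoopA_digit _ _ _ _ h, pmnLoopA_digit _ _ _ _ h]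
        have hr : rest.length ≤ n := by simp at hlen; omega
        rw [ih rest _ hr]
        simp only [List.nil_append]
        rw [ih rest (List.replicate (d.toNat - 48) (pmnFace c)) hr]
        simp
      · have h' : PySem.Chars.isdigit d = false := by simpa using h
        rw [pmnLoopA_nondigit _ _ _ _ h', pmnLoopA_nondigit _ _ _ _ h']
        have hr : (d :: rest).length ≤ n := by simp at hlen ⊢; omega
        rw [ih (d :: rest) _ hr]
        simp only [List.nil_append]
        rw [ih (d :: rest) (List.replicate 1 (pmnFace c)) hr]
        simp

lemma pmnLoopA_acc (cs : List Char) (m : List (String × String)) :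
    pmnLoopA cs m = m ++ pmnLoopA cs [] :=
  pmnLoopA_acc_aux cs.length cs m le_rfl

-- B's token accumulator appends on the left
lemma pmnFold_acc (cs : List Char) (t : List (Char × Nat)) (p : Option Char) :
    cs.foldl pmnStep (t, p) =
      (t ++ (cs.foldl pmnStep ([], p)).1, (cs.foldl pmnStep ([], p)).2) := by
  induction cs generalizing t p with
  | nil => simp
  | cons c cs ih =>
    simp only [List.foldl_cons]
    cases p with
    | none =>
      rw [pmnStep_none, pmnStep_none, ih]
    | some q =>
      by_cases hd : PySem.Chars.isdigit c = true
      · rw [pmnStep_digit _ _ _ hd, pmnStep_digit _ _ _ hd, ih,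
          ih (t := [] ++ [(q, c.toNat - 48)])]
        simp
      · have hd' : PySem.Chars.isdigit c = false := by simpa using hd
        rw [pmnStep_nondigit _ _ _ hd', pmnStep_nondigit _ _ _ hd', ih,
          ih (t := [] ++ [(q, 1)])]
        simp

lemma pmnExpand_append (a b : List (Char × Nat)) :
    pmnExpand (a ++ b) = pmnExpand a ++ pmnExpand b := by
  simp [pmnExpand]

lemma pmn_upperChar_of_isupper (c : Char) (h : PySem.Chars.isupper c = true) :
    PySem.Chars.upperChar c = c := by
  have hl : PySem.Chars.islower c = false := by
    unfold PySem.Chars.islower PySem.Chars.isupper at *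
    simp only [Bool.and_eq_true, decide_eq_true_eq, Char.le_def, UInt32.le_iff_toNat_le] at h
    simp only [Bool.and_eq_false_iff, decide_eq_false_iff_not, Char.le_def, UInt32.le_iff_toNat_le]
    have h1 : ('a' : Char).val.toNat = 97 := rfl
    have h2 : ('Z' : Char).val.toNat = 90 := rfl
    left; omega
  unfold PySem.Chars.upperChar
  rw [hl]
  simp

-- the expansion of a single token is A's (face, direction) pair replicated
lemma pmnExpand_single (c : Char) (n : Nat) :
    pmnExpand [(c, n)] = List.replicate n (pmnFace c) := by
  simp only [pmnExpand, List.flatMap_cons, List.flatMap_nil, List.append_nil, pmnFace]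
  by_cases h : PySem.Chars.isupper c = true
  · simp [h, pmn_upperChar_of_isupper c h]
  · simp [h]

-- pmnFinish distributes over a token-list prefix
lemma pmnFinish_append (a : List (Char × Nat)) (st : List (Char × Nat) × Option Char) :
    pmnFinish (a ++ st.1, st.2) = a ++ pmnFinish st := by
  unfold pmnFinish
  cases st.2 <;> simp

-- main invariant: B's fold from a pending state matches A's two-char-step loop
lemma pmnMain : ∀ (n : Nat) (cs : List Char), cs.length ≤ n →
    (pmnExpand (pmnFinish (cs.foldl pmnStep ([], none))) = pmnLoopA cs []) ∧
    (∀ p, pmnExpand (pmnFinish (cs.foldl pmnStep ([], some p))) = pmnLoopA (p :: cs) []) := by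
  intro n
  induction n with
  | zero =>
    intro cs hlen
    have : cs = [] := List.eq_nil_of_length_eq_zero (Nat.le_zero.mp hlen)
    subst this
    refine ⟨rfl, ?_⟩
    intro p
    show pmnExpand [(p, 1)] = pmnLoopA [p] []
    rw [pmnExpand_single, pmnLoopA_one]; simp
  | succ n ih =>
    intro cs hlen
    constructor
    · cases cs with
      | nil => rfl
      | cons c cs' =>
        simp only [List.foldl_cons, pmnStep_none]
        exact (ih cs' (Nat.le_of_succ_le_succ hlen)).2 c
    · intro p
      cases cs with
      | nil =>
        show pmnExpand [(p, 1)] = pmnLoopA [p] []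
        rw [pmnExpand_single, pmnLoopA_one]; simp
      | cons c cs' =>
        have hlen' : cs'.length ≤ n := Nat.le_of_succ_le_succ hlen
        by_cases hd : PySem.Chars.isdigit c = true
        · simp only [List.foldl_cons, pmnStep_digit _ _ _ hd]
          rw [pmnFold_acc, pmnFinish_append, pmnExpand_append, (ih cs' hlen').1]
          simp only [List.nil_append]
          rw [pmnExpand_single]
          rw [pmnLoopA_digit _ _ _ _ hd]
          simp only [List.nil_append]
          rw [pmnLoopA_acc cs' (List.replicate (c.toNat - 48) (pmnFace p))]
        · have hd' : PySem.Chars.isdigit c = false := by simpa using hd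
          simp only [List.foldl_cons, pmnStep_nondigit _ _ _ hd']
          rw [pmnFold_acc, pmnFinish_append, pmnExpand_append, (ih cs' hlen').2 c]
          simp only [List.nil_append]
          rw [pmnExpand_single]
          rw [pmnLoopA_nondigit _ _ _ _ hd']
          simp only [List.nil_append]
          rw [pmnLoopA_acc (c :: cs') (List.replicate 1 (pmnFace p))]

-- ===== VERDICT (by name: the statement is the Claim_ definition above) =====
theorem parse_move_notation_spec : Claim_equal_parse_move_notation := by
  intro s _
  unfold Spec_parse_move_notation parse_move_notation parse_move_notation_alt
  exact ((pmnMain s.toList.length s.toList le_rfl).1).symm
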